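-- pv_equiv track=rewrite | github.com/xsjmonk/agent-long-term-memory | agent_embedding_builder/app/config_loader.py | _strip_jsonc
-- ===== SOURCE A (Python) =====
-- def _strip_jsonc(text: str) -> str:
--     result: list[str] = []
--     in_string = False
--     escape = False
--     i = 0
--     while i < len(text):
--         ch = text[i]
--         nxt = text[i + 1] if i + 1 < len(text) else ""
--         if in_string:
--             result.append(ch)
--             if escape:
--                 escape = False
--             elif ch == "\\":
--                 escape = True
--             elif ch == '"':
--                 in_string = False
--             i += 1
--             continue
--         if ch == '"':
--             in_string = True
--             result.append(ch)
--             i += 1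
--             continue
--         if ch == "/" and nxt == "/":
--             i += 2
--             while i < len(text) and text[i] != "\n":
--                 i += 1
--             continue
--         if ch == "/" and nxt == "*":
--             i += 2
--             while i + 1 < len(text) and not (text[i] == "*" and text[i + 1] == "/"):
--                 i += 1
--             i += 2
--             continue
--         result.append(ch)
--         i += 1
--     return "".join(result)
-- ===== SOURCE B (Python) =====
-- def _strip_jsonc(text: str) -> str:
--     out = []
--     i, n = 0, len(text)
--     while i < n:
--         ch = text[i]
--         if ch == '"':
--             j = i + 1
--             while j < n:
--                 if text[j] == '\\':
--                     j += 2
--                 elif text[j] == '"':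
--                     j += 1
--                     break
--                 else:
--                     j += 1
--             out.append(text[i:j])
--             i = j
--         elif text.startswith('//', i):
--             nl = text.find('\n', i)
--             i = n if nl == -1 else nl
--         elif text.startswith('/*', i):
--             end = text.find('*/', i + 2)
--             i = n if end == -1 else end + 2
--         else:
--             out.append(ch)
--             i += 1
--     return ''.join(out)
-- ===== Notes on version B (the rewrite author's own statement) =====
-- stated objective: idiomatic
-- what changed: A's single while loop driven by in_string/escape boolean state flags is replaced by a token-at-a-time scanner: each step consumes a whole string literal (eating backslash-escape pairs), skips a whole line comment or block comment using str.find for its terminator, or copies one character; no cross-iteration state remains.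
import Mathlib
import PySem

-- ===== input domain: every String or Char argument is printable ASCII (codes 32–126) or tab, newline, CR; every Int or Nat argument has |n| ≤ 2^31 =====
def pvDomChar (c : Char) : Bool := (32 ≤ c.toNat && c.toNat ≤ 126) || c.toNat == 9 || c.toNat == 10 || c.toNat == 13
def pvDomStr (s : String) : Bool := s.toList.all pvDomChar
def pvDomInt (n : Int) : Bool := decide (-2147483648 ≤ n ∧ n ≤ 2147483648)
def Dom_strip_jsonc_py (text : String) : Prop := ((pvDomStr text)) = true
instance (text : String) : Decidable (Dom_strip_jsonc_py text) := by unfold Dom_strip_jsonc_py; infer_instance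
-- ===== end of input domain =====

-- B replaces A's single while-loop state machine (in_string/escape booleans) with a
-- find-based scanner that consumes a whole token (string literal, // comment, /* */
-- comment) per step; objective: simpler/idiomatic, proved to return the same string.

-- ===== PORT A =====
theorem pvTailLenLe (l : List Char) : l.tail.length ≤ l.length := by cases l <;> simp

-- A's inner `while i < len(text) and text[i] != '\n'` loop (leaves the '\n' in place)
def pvSkipLineA : List Char → List Char
  | [] => []
  | c :: rest => if c = '\n' then c :: rest else pvSkipLineA rest

-- A's inner `while i+1 < len and not (text[i]=='*' and text[i+1]=='/')` loop, then `i += 2`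
def pvSkipBlockA : List Char → List Char
  | [] => []
  | [_] => []
  | c :: c2 :: rest => if c = '*' ∧ c2 = '/' then rest else pvSkipBlockA (c2 :: rest)

theorem pvSkipLineA_len_le (l : List Char) : (pvSkipLineA l).length ≤ l.length := by
  induction l with
  | nil => simp [pvSkipLineA]
  | cons c rest ih =>
    simp only [pvSkipLineA]; split
    · simp
    · exact Nat.le_succ_of_le ih

theorem pvSkipBlockA_len_le (l : List Char) : (pvSkipBlockA l).length ≤ l.length := by
  induction l with
  | nil => simp [pvSkipBlockA]
  | cons c rest ih =>
    cases rest with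
    | nil => simp [pvSkipBlockA]
    | cons c2 rest' =>
      simp only [pvSkipBlockA]; split
      · simp only [List.length_cons]; omega
      · exact Nat.le_succ_of_le ih

-- A's main while loop; state = (in_string, escape), result accumulated in order
def pvStripA : List Char → Bool → Bool → List Char
  | [], _, _ => []
  | c :: rest, inStr, escape =>
    if inStr then
      c :: (if escape then pvStripA rest true false
            else if c = '\\' then pvStripA rest true true
            else if c = '"' then pvStripA rest false false
            else pvStripA rest true false)
    else if c = '"' then c :: pvStripA rest true false
    else if c = '/' ∧ rest.head? = some '/' then pvStripA (pvSkipLineA rest.tail) false false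
    else if c = '/' ∧ rest.head? = some '*' then pvStripA (pvSkipBlockA rest.tail) false false
    else c :: pvStripA rest false false
termination_by l _ _ => l.length
decreasing_by
  · simp
  · simp
  · simp
  · simp
  · simp
  · exact Nat.lt_succ_of_le (Nat.le_trans (pvSkipLineA_len_le _) (pvTailLenLe _))
  · exact Nat.lt_succ_of_le (Nat.le_trans (pvSkipBlockA_len_le _) (pvTailLenLe _))
  · simp

def strip_jsonc_py (text : String) : String := String.ofList (pvStripA text.toList false false)

-- ===== PORT B =====
-- B's inner `j` loop: scans a string body consuming `\x` pairs at once;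
-- returns (the slice text[i:j], the rest)
def pvScanStr : List Char → List Char × List Char
  | [] => ([], [])
  | c :: rest =>
    if c = '\\' then
      match rest with
      | [] => ([c], [])
      | c2 :: rest' => let p := pvScanStr rest'; (c :: c2 :: p.1, p.2)
    else if c = '"' then ([c], rest)
    else let p := pvScanStr rest; (c :: p.1, p.2)

-- B's `text.find('*/', i+2)` step: suffix just after the first "*/" ([] when absent)
def pvFindBlockEnd : List Char → List Char
  | [] => []
  | c :: rest => if c = '*' ∧ rest.head? = some '/' then rest.tail else pvFindBlockEnd rest

theorem pvScanStr_len_le : ∀ l : List Char, (pvScanStr l).2.length ≤ l.length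
  | [] => by simp [pvScanStr]
  | [c] => by
    simp only [pvScanStr]
    split
    · simp
    · split <;> simp
  | c :: c2 :: rest => by
    simp only [pvScanStr]
    split
    · exact Nat.le_trans (pvScanStr_len_le rest) (by simp; omega)
    · split
      · simp
      · exact Nat.le_succ_of_le (pvScanStr_len_le (c2 :: rest))

theorem pvFindBlockEnd_len_le (l : List Char) : (pvFindBlockEnd l).length ≤ l.length := by
  induction l with
  | nil => simp [pvFindBlockEnd]
  | cons c rest ih =>
    simp only [pvFindBlockEnd]; split
    · exact Nat.le_succ_of_le (pvTailLenLe _)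
    · exact Nat.le_succ_of_le ih

-- B's main loop: one token per step
def pvStripB : List Char → List Char
  | [] => []
  | c :: rest =>
    if c = '"' then let p := pvScanStr rest; c :: (p.1 ++ pvStripB p.2)
    else if c = '/' ∧ rest.head? = some '/' then pvStripB (List.dropWhile (· ≠ '\n') rest.tail)
    else if c = '/' ∧ rest.head? = some '*' then pvStripB (pvFindBlockEnd rest.tail)
    else c :: pvStripB rest
termination_by l => l.length
decreasing_by
  · exact Nat.lt_succ_of_le (pvScanStr_len_le _)
  · exact Nat.lt_succ_of_le (Nat.le_trans (List.length_dropWhile_le _ _) (pvTailLenLe _))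
  · exact Nat.lt_succ_of_le (Nat.le_trans (pvFindBlockEnd_len_le _) (pvTailLenLe _))
  · simp

def strip_jsonc_py_alt (text : String) : String := String.ofList (pvStripB text.toList)

-- ===== PRECONDITION & SPEC =====
def Spec_strip_jsonc_py (text : String) (out : String) : Prop := out = strip_jsonc_py_alt text
instance (text : String) (out : String) : Decidable (Spec_strip_jsonc_py text out) := by unfold Spec_strip_jsonc_py; infer_instance

-- ===== CLAIM (what is proved, stated in full; the proofs are below) =====
def Claim_equal_strip_jsonc_py : Prop := ∀ (text : String), Dom_strip_jsonc_py text → Spec_strip_jsonc_py text (strip_jsonc_py text)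

-- ===== LEMMAS AND PROOFS =====

theorem pvSkipLineA_eq_dropWhile (l : List Char) :
    pvSkipLineA l = List.dropWhile (· ≠ '\n') l := by
  induction l with
  | nil => simp [pvSkipLineA]
  | cons c rest ih =>
    simp only [pvSkipLineA, List.dropWhile]
    by_cases h : c = '\n' <;> simp [h, ih]

theorem pvFindBlockEnd_cons2 (c c2 : Char) (rest : List Char) :
    pvFindBlockEnd (c :: c2 :: rest) = if c = '*' ∧ c2 = '/' then rest else pvFindBlockEnd (c2 :: rest) := by
  conv_lhs => rw [pvFindBlockEnd]
  simp

theorem pvSkipBlockA_eq_findBlockEnd (l : List Char) :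
    pvSkipBlockA l = pvFindBlockEnd l := by
  induction l with
  | nil => simp [pvSkipBlockA, pvFindBlockEnd]
  | cons c rest ih =>
    cases rest with
    | nil => simp [pvSkipBlockA, pvFindBlockEnd]
    | cons c2 rest' =>
      rw [pvSkipBlockA, pvFindBlockEnd_cons2, ih]

-- Key invariant, by strong induction on length: inside a string A (with escape = false)
-- produces exactly B's string slice followed by the translation of the rest; outside a
-- string A and B agree.
theorem pvStrip_equiv (n : ℕ) :
    (∀ l : List Char, l.length ≤ n →
        pvStripA l true false = (pvScanStr l).1 ++ pvStripB (pvScanStr l).2) ∧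
    (∀ l : List Char, l.length ≤ n → pvStripA l false false = pvStripB l) := by
  induction n with
  | zero =>
    constructor <;> intro l hl <;>
      (match l, hl with
       | [], _ => simp [pvStripA, pvStripB, pvScanStr])
  | succ n ih =>
    obtain ⟨ihS, ihO⟩ := ih
    have hS : ∀ l : List Char, l.length ≤ n + 1 →
        pvStripA l true false = (pvScanStr l).1 ++ pvStripB (pvScanStr l).2 := by
      intro l hl
      match l with
      | [] => simp [pvStripA, pvScanStr, pvStripB]
      | c :: rest =>
        rw [pvStripA, pvScanStr.eq_def]
        simp only [if_true, if_false, Bool.false_eq_true]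
        by_cases hb : c = '\\'
        · rw [if_pos hb, if_pos hb]
          cases rest with
          | nil => simp [pvStripA, pvStripB, hb]
          | cons c2 rest' =>
            have hr : rest'.length ≤ n := by simp at hl; omega
            rw [pvStripA]
            simp only [if_true]
            rw [ihS rest' hr]
            simp [hb]
        · rw [if_neg hb, if_neg hb]
          by_cases hq : c = '"'
          · rw [if_pos hq, if_pos hq]
            have hr : rest.length ≤ n := by simp at hl; omega
            rw [ihO rest hr]
            simp
          · rw [if_neg hq, if_neg hq]
            have hr : rest.length ≤ n := by simp at hl; omega
            rw [ihS rest hr]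
            simp
    refine ⟨hS, ?_⟩
    intro l hl
    match l with
    | [] => simp [pvStripA, pvStripB]
    | c :: rest =>
      have hr : rest.length ≤ n := by simp at hl; omega
      rw [pvStripA, pvStripB]
      simp only [Bool.false_eq_true, if_false]
      by_cases hq : c = '"'
      · rw [if_pos hq, if_pos hq, hS rest (by omega)]
      · rw [if_neg hq, if_neg hq]
        by_cases hsl : c = '/' ∧ rest.head? = some '/'
        · rw [if_pos hsl, if_pos hsl, pvSkipLineA_eq_dropWhile]
          exact ihO _ (Nat.le_trans (Nat.le_trans (List.length_dropWhile_le _ _) (pvTailLenLe _)) hr)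
        · rw [if_neg hsl, if_neg hsl]
          by_cases hbl : c = '/' ∧ rest.head? = some '*'
          · rw [if_pos hbl, if_pos hbl, pvSkipBlockA_eq_findBlockEnd]
            exact ihO _ (Nat.le_trans (Nat.le_trans (pvFindBlockEnd_len_le _) (pvTailLenLe _)) hr)
          · rw [if_neg hbl, if_neg hbl, ihO rest hr]

-- ===== VERDICT (by name: the statement is the Claim_ definition above) =====
theorem strip_jsonc_py_spec : Claim_equal_strip_jsonc_py := by
  intro text _
  unfold Spec_strip_jsonc_py strip_jsonc_py strip_jsonc_py_alt
  exact congrArg String.ofList ((pvStrip_equiv text.toList.length).2 text.toList le_rfl)
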